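-- pv_equiv track=rewrite | github.com/Spades5665/MTUClasses | CS4811-AI/tutorial-1/tutorial/submission.py | reduceStr
-- ===== SOURCE A (Python) =====
-- def reduceStr(text):
--     if int(len(text)) < 2: return text
--     index = 0
--     maxDist = -1
--     for i in range(0, int(len(text))):
--         distance = text.rindex(text[i]) - i
--         if distance > maxDist:
--             index = i
--             maxDist = distance
--     if maxDist == 0: return text[index]
--     return text[index] + reduceStr(text[index + 1:text.rindex(text[index])]) + text[index]
-- ===== SOURCE B (Python) =====
-- def reduceStr(text):
--     left = []
--     right = []
--     while len(text) >= 2: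
--         last = {}
--         for i, c in enumerate(text):
--             last[c] = i
--         index = 0
--         maxDist = -1
--         for i, c in enumerate(text):
--             d = last[c] - i
--             if d > maxDist:
--                 index = i
--                 maxDist = d
--         if maxDist == 0:
--             return ''.join(left) + text[index] + ''.join(right)
--         c = text[index]
--         left.append(c)
--         right.insert(0, c)
--         text = text[index + 1:last[c]]
--     return ''.join(left) + text + ''.join(right)
-- ===== Notes on version B (the rewrite author's own statement) =====
-- stated objective: alternative
-- what changed: A's recursion with a rindex call inside the scan loop becomes an iterative loop with left/right accumulators that first builds a last-occurrence dictionary in one pass and then scans it with dictionary lookups (measured ~1.4x, below the 1.5x bar, so no speed is claimed).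
import Mathlib
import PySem

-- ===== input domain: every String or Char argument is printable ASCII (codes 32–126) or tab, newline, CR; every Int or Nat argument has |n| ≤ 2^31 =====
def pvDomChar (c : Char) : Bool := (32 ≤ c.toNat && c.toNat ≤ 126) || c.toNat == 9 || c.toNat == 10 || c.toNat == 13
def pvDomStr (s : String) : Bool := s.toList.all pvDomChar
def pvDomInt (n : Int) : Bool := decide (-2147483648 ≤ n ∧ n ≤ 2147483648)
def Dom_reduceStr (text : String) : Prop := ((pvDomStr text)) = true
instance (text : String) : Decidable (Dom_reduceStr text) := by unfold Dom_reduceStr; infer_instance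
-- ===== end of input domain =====

-- B replaces A's recursion (rindex re-scanned inside the loop) by an iterative accumulator loop
-- that builds a last-occurrence dictionary once per level and scans it with dictionary lookups.

-- ===== PORT A =====
-- hand port of Python's str.rindex(c): index of the LAST occurrence of c
-- (exact whenever c occurs in the list, which holds at every call site below)
def pvLastIdx (l : List Char) (c : Char) : Nat :=
  (List.range l.length).foldl (fun acc i => if l.getD i ' ' = c then i else acc) 0

-- A's scan: for i in range(len): distance = rindex(text[i]) - i; keep strict max
def pvScan (l : List Char) : Nat × Int :=
  (List.range l.length).foldl
    (fun (st : Nat × Int) i =>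
      let d : Int := (pvLastIdx l (l.getD i ' ') : Int) - i
      if st.2 < d then (i, d) else st)
    (0, -1)

def reduceL (l : List Char) : List Char :=
  if _h : l.length < 2 then l
  else
    if (pvScan l).2 = 0 then [l.getD (pvScan l).1 ' ']
    else
      -- text[index+1 : rindex(c)]  (both bounds are in 0..len, so the slice is drop/take)
      l.getD (pvScan l).1 ' ' ::
        reduceL ((l.drop ((pvScan l).1 + 1)).take
          (pvLastIdx l (l.getD (pvScan l).1 ' ') - ((pvScan l).1 + 1))) ++ [l.getD (pvScan l).1 ' ']
termination_by l.length
decreasing_by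
  simp only [List.length_take, List.length_drop]
  omega

def reduceStr (text : String) : String := String.ofList (reduceL text.toList)

-- ===== PORT B =====
-- last = {}; for i, c in enumerate(text): last[c] = i
def lastMap (l : List Char) : PySem.Dict Char Int :=
  (PySem.List.enumerate l).foldl (fun d p => d.insert p.2 p.1) PySem.Dict.empty

-- index = 0; maxDist = -1; for i, c in enumerate(text): d = last[c] - i; keep strict max
-- (last[c] ≥ 0 always, so .toNat on the kept index is exact)
def scanB (l : List Char) (last : PySem.Dict Char Int) : Nat × Int :=
  (PySem.List.enumerate l).foldl
    (fun (st : Nat × Int) p =>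
      let d : Int := last.getD p.2 0 - p.1
      if st.2 < d then (p.1.toNat, d) else st)
    (0, -1)

-- while len(text) >= 2: … ; left/right are the accumulated prefix and suffix
def reduceLoopB (left l right : List Char) : List Char :=
  if _h : 2 ≤ l.length then
    let last := lastMap l
    let st := scanB l last
    if st.2 = 0 then left ++ [l.getD st.1 ' '] ++ right
    else
      let c := l.getD st.1 ' '
      reduceLoopB (left ++ [c])
        ((l.drop (st.1 + 1)).take ((last.getD c 0).toNat - (st.1 + 1)))
        (c :: right)
  else left ++ l ++ right
termination_by l.length
decreasing_by
  simp only [List.length_take, List.length_drop]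
  omega

def reduceStr_alt (text : String) : String := String.ofList (reduceLoopB [] text.toList [])

-- ===== PRECONDITION & SPEC =====
def Spec_reduceStr (text : String) (out : String) : Prop := out = reduceStr_alt text
instance (text : String) (out : String) : Decidable (Spec_reduceStr text out) := by unfold Spec_reduceStr; infer_instance

-- ===== CLAIM (what is proved, stated in full; the proofs are below) =====
def Claim_equal_reduceStr : Prop := ∀ (text : String), Dom_reduceStr text → Spec_reduceStr text (reduceStr text)

-- ===== LEMMAS AND PROOFS =====

theorem lastMap_append (l : List Char) (a : Char) :
    lastMap (l ++ [a]) = (lastMap l).insert a (l.length : Int) := by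
  unfold lastMap
  simp [PySem.List.enumerate_append, PySem.List.enumerate_cons, List.foldl_append]

theorem pvLastIdx_append (l : List Char) (a : Char) (c : Char) :
    pvLastIdx (l ++ [a]) c = if a = c then l.length else pvLastIdx l c := by
  unfold pvLastIdx
  rw [List.length_append, List.length_singleton, List.range_succ, List.foldl_append]
  have hinner : List.foldl (fun acc i => if (l ++ [a]).getD i ' ' = c then i else acc) 0
      (List.range l.length) =
      List.foldl (fun acc i => if l.getD i ' ' = c then i else acc) 0 (List.range l.length) := by
    apply PySem.List.foldl_congr_mem
    intro acc x hx
    simp only [List.mem_range] at hx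
    rw [List.getD_append _ _ _ _ hx]
  rw [hinner]
  simp only [List.foldl_cons, List.foldl_nil]
  have hlast : (l ++ [a]).getD l.length ' ' = a := by
    simp [List.getD_eq_getElem?_getD]
  rw [hlast]

theorem lastMap_get? (l : List Char) (c : Char) (hc : c ∈ l) :
    (lastMap l).get? c = some ((pvLastIdx l c : Int)) := by
  induction l using List.reverseRecOn with
  | nil => simp at hc
  | append_singleton l a ih =>
      rw [lastMap_append, pvLastIdx_append]
      by_cases h : c = a
      · subst h
        simp [PySem.Dict.get?_insert_self]
      · have hcl : c ∈ l := by
          rcases List.mem_append.mp hc with h1 | h1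
          · exact h1
          · simp at h1; exact absurd h1 h
        rw [PySem.Dict.get?_insert_of_ne _ _ h, ih hcl,
          if_neg (fun hh => h hh.symm)]

theorem lastMap_getD (l : List Char) (c : Char) (hc : c ∈ l) :
    (lastMap l).getD c 0 = (pvLastIdx l c : Int) := by
  rw [PySem.Dict.getD_eq_get?_getD, lastMap_get? l c hc]
  rfl

theorem enum_eq_map (l : List Char) :
    PySem.List.enumerate l = (List.range l.length).map (fun (i : Nat) => ((i : Int), l.getD i ' ')) := by
  apply List.ext_getElem
  · simp [PySem.List.length_enumerate]
  · intro i h1 h2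
    have h1' : i < l.length := by simpa [PySem.List.length_enumerate] using h1
    simp [PySem.List.getElem_enumerate, List.getD_eq_getElem?_getD,
      List.getElem?_eq_getElem h1']

theorem scanB_eq_pvScan (l : List Char) : scanB l (lastMap l) = pvScan l := by
  unfold scanB pvScan
  rw [enum_eq_map, List.foldl_map]
  apply PySem.List.foldl_congr_mem
  intro st i hi
  simp only [List.mem_range] at hi
  have hmem : l.getD i ' ' ∈ l := by
    rw [List.getD_eq_getElem?_getD, List.getElem?_eq_getElem hi]
    exact List.getElem_mem hi
  dsimp only
  rw [lastMap_getD l _ hmem]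
  simp

-- the scan's kept index is always an index into l (for nonempty l)
theorem pvScan_fst_lt (l : List Char) (h : 0 < l.length) : (pvScan l).1 < l.length := by
  unfold pvScan
  have : ∀ (r : List Nat) (st : Nat × Int), st.1 < l.length → (∀ i ∈ r, i < l.length) →
      (r.foldl (fun (st : Nat × Int) i =>
        let d : Int := (pvLastIdx l (l.getD i ' ') : Int) - i
        if st.2 < d then (i, d) else st) st).1 < l.length := by
    intro r
    induction r with
    | nil => intro st h1 _; exact h1
    | cons x xs ih =>
        intro st h1 h2
        simp only [List.foldl_cons]
        apply ih
        · dsimp only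
          split
          · exact h2 x (List.mem_cons_self)
          · exact h1
        · intro i hi; exact h2 i (List.mem_cons_of_mem _ hi)
  exact this _ _ h (by intro i hi; exact List.mem_range.mp hi)

theorem reduceLoopB_eq_aux (n : Nat) (left l right : List Char) (hn : l.length ≤ n) :
    reduceLoopB left l right = left ++ reduceL l ++ right := by
  induction n generalizing left l right with
  | zero =>
      rw [reduceLoopB, reduceL]
      have h1 : ¬ 2 ≤ l.length := by omega
      have h2 : l.length < 2 := by omega
      simp [h1, h2]
  | succ n ih =>
      by_cases h : 2 ≤ l.length
      · rw [reduceLoopB, reduceL]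
        rw [dif_pos h, dif_neg (show ¬ l.length < 2 by omega)]
        have hlt : (pvScan l).1 < l.length := pvScan_fst_lt l (by omega)
        have hmem : l.getD (pvScan l).1 ' ' ∈ l := by
          rw [List.getD_eq_getElem?_getD, List.getElem?_eq_getElem hlt]
          exact List.getElem_mem hlt
        simp only [scanB_eq_pvScan, lastMap_getD l _ hmem, Int.toNat_natCast]
        by_cases hz : (pvScan l).2 = 0
        · rw [if_pos hz, if_pos hz]
        · rw [if_neg hz, if_neg hz]
          rw [ih _ _ _ (by simp only [List.length_take, List.length_drop]; omega)]
          simp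
      · rw [reduceLoopB, reduceL]
        have h2 : l.length < 2 := by omega
        simp [h, h2]

theorem reduceLoopB_eq (left l right : List Char) :
    reduceLoopB left l right = left ++ reduceL l ++ right :=
  reduceLoopB_eq_aux l.length left l right le_rfl

-- ===== VERDICT (by name: the statement is the Claim_ definition above) =====
theorem reduceStr_spec : Claim_equal_reduceStr := by
  intro text _
  unfold Spec_reduceStr reduceStr reduceStr_alt
  rw [reduceLoopB_eq]
  simp
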